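-- pv_equiv track=rewrite | github.com/YEDITEPE-Sayisal-Tasarim-Toplulugu/7Yonga | firmware/ldpc.py | generate_codeword
-- ===== SOURCE A (Python) =====
-- def generate_codeword(expanded_matrix, infobits):
--     # Systematic LDPC encoding: codeword = [infobits] + [parity_bits]
--     # Assume first K columns are info bits, remaining are parity bits
--     K = len(infobits)
--     N = len(expanded_matrix[0])
--     M = len(expanded_matrix)
--     parity_bits = [0] * (N - K)
--
--
--     for p in range(N - K):
--         parity_val = 0
--         for row in range(M):
--
--             info_sum = 0
--             for k in range(K):
--                 if expanded_matrix[row][k] == 1: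
--                     info_sum ^= infobits[k]
--
--             if expanded_matrix[row][K + p] == 1:
--                 parity_val ^= info_sum
--         parity_bits[p] = parity_val
--
--     codeword = infobits + parity_bits
--     return codeword
-- ===== SOURCE B (Python) =====
-- def generate_codeword(expanded_matrix, infobits):
--     # Systematic LDPC encoding, two passes:
--     # pass 1: XOR-sum of info bits selected by each row (computed once per row);
--     # pass 2: combine those per-row sums per parity column.
--     N = len(expanded_matrix[0])
--     K = len(infobits)
--     info_sums = []
--     for row in expanded_matrix:
--         s = 0
--         for c, b in zip(row, infobits):
--             if c == 1:
--                 s ^= b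
--         info_sums.append(s)
--     parity = []
--     for p in range(K, N):
--         v = 0
--         for row, s in zip(expanded_matrix, info_sums):
--             if row[p] == 1:
--                 v ^= s
--         parity.append(v)
--     return infobits + parity
-- ===== Notes on version B (the rewrite author's own statement) =====
-- stated objective: alternative
-- what changed: B computes each row's XOR-sum of selected info bits once in a first pass (zipping row with infobits), then combines those per-row sums once per parity column, instead of recomputing every row's info sum inside every parity column's loop.
import Mathlib
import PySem

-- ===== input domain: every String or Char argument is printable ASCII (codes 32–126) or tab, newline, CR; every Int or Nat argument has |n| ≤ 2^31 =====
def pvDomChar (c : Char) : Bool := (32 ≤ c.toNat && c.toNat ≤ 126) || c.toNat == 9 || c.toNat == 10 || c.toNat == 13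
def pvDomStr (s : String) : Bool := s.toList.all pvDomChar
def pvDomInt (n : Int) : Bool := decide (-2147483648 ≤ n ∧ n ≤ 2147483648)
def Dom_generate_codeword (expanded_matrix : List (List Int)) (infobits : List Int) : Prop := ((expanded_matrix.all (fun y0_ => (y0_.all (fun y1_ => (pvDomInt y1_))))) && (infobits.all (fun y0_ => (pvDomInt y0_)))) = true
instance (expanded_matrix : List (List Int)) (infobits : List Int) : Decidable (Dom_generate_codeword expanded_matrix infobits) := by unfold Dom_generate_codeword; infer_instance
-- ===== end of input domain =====

-- B replaces A's triple loop (which recomputes every row's info XOR-sum for each parity column)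
-- by one pass computing the per-row sums plus one combining pass per parity column.

-- ===== PORT A =====
def generate_codeword (expanded_matrix : List (List Int)) (infobits : List Int) : List Int :=
  let K : Int := infobits.length
  let N : Int := ((PySem.List.pyGet? expanded_matrix 0).getD []).length
  let M : Int := expanded_matrix.length
  let parity_bits :=
    (PySem.List.pyRange 0 (N - K) 1).map (fun p =>
      (PySem.List.pyRange 0 M 1).foldl (fun parity_val row =>
        let r := PySem.List.pyGetD expanded_matrix row []
        let info_sum := (PySem.List.pyRange 0 K 1).foldl (fun s k =>
          if PySem.List.pyGetD r k 0 = 1 then PySem.Int.bxor s (PySem.List.pyGetD infobits k 0) else s) 0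
        if PySem.List.pyGetD r (K + p) 0 = 1 then PySem.Int.bxor parity_val info_sum else parity_val) 0)
  infobits ++ parity_bits

-- ===== PORT B =====
def generate_codeword_alt (expanded_matrix : List (List Int)) (infobits : List Int) : List Int :=
  let N : Int := ((PySem.List.pyGet? expanded_matrix 0).getD []).length
  let K : Int := infobits.length
  let info_sums := expanded_matrix.map (fun row =>
    (row.zip infobits).foldl (fun s cb => if cb.1 = 1 then PySem.Int.bxor s cb.2 else s) 0)
  let parity :=
    (PySem.List.pyRange K N 1).map (fun p =>
      (expanded_matrix.zip info_sums).foldl (fun v rs =>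
        if PySem.List.pyGetD rs.1 p 0 = 1 then PySem.Int.bxor v rs.2 else v) 0)
  infobits ++ parity

-- ===== PRECONDITION & SPEC =====
-- Pre_ excludes exactly the inputs where A raises IndexError: an empty matrix
-- (expanded_matrix[0]), or — when there are parity columns (K < N) — a row shorter than N.
def Pre_generate_codeword (expanded_matrix : List (List Int)) (infobits : List Int) : Prop :=
  expanded_matrix ≠ [] ∧
    (infobits.length < (expanded_matrix.headD []).length →
      ∀ row ∈ expanded_matrix, (expanded_matrix.headD []).length ≤ row.length)
instance (expanded_matrix : List (List Int)) (infobits : List Int) : Decidable (Pre_generate_codeword expanded_matrix infobits) := by unfold Pre_generate_codeword; infer_instance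
def pvWitness_generate_codeword : List (List Int) × List Int := ([[1,1,0],[0,1,1]], [1,0])

def Spec_generate_codeword (expanded_matrix : List (List Int)) (infobits : List Int) (out : List Int) : Prop := out = generate_codeword_alt expanded_matrix infobits
instance (expanded_matrix : List (List Int)) (infobits : List Int) (out : List Int) : Decidable (Spec_generate_codeword expanded_matrix infobits out) := by unfold Spec_generate_codeword; infer_instance

-- ===== CLAIM (what is proved, stated in full; the proofs are below) =====
def Claim_equal_generate_codeword : Prop := ∀ (expanded_matrix : List (List Int)) (infobits : List Int), Dom_generate_codeword expanded_matrix infobits → Pre_generate_codeword expanded_matrix infobits → Spec_generate_codeword expanded_matrix infobits (generate_codeword expanded_matrix infobits)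

-- ===== LEMMAS AND PROOFS =====

-- A's index-loop info sum equals B's zip-fold info sum, for a row long enough.
theorem inner_eq (r ib : List Int) (s : Int) (h : ib.length ≤ r.length) :
    (List.range ib.length).foldl (fun s k => if r.getD k 0 = 1 then PySem.Int.bxor s (ib.getD k 0) else s) s
      = (r.zip ib).foldl (fun s cb => if cb.1 = 1 then PySem.Int.bxor s cb.2 else s) s := by
  induction ib generalizing r s with
  | nil => simp
  | cons b bs ih =>
    cases r with
    | nil => simp at h
    | cons c cs =>
      simp only [List.length_cons, List.range_succ_eq_map, List.foldl_cons, List.foldl_map,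
        List.getD_cons_zero, List.getD_cons_succ, List.zip_cons_cons]
      exact ih cs _ (by simpa using h)


-- zipping a list with a map of itself is a single map
theorem zip_self_map {α β : Type} (l : List α) (f : α → β) :
    l.zip (l.map f) = l.map (fun a => (a, f a)) := by
  induction l with
  | nil => rfl
  | cons x xs ih => simp [ih]


-- a fold over range-indices with getD is a fold over the list itself
theorem foldl_range_getD {a b : Type} (xs : List a) (d : a) (f : b → a → b) (init : b) :
    (List.range xs.length).foldl (fun acc i => f acc (xs.getD i d)) init = xs.foldl f init := by
  induction xs generalizing init with
  | nil => rfl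
  | cons x l ih =>
    simp only [List.length_cons, List.range_succ_eq_map, List.foldl_cons, List.foldl_map,
      List.getD_cons_zero, List.getD_cons_succ]
    exact ih (f init x)

-- ===== VERDICT (by name: the statement is the Claim_ definition above) =====
theorem generate_codeword_spec : Claim_equal_generate_codeword := by
  intro em ib _ hpre
  obtain ⟨hne, hrows⟩ := hpre
  unfold Spec_generate_codeword generate_codeword generate_codeword_alt
  simp only []
  refine congrArg (ib ++ ·) ?_
  simp only [PySem.List.pyRange_one, sub_zero, List.map_map]
  refine List.map_congr_left ?_
  intro k hk
  simp only [Function.comp, zero_add, Int.toNat_natCast, List.foldl_map,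
    PySem.List.pyGetD_natCast, zip_self_map, List.foldl_map]
  rw [foldl_range_getD em [] (fun acc r =>
    if PySem.List.pyGetD r ((ib.length : Int) + (k : Int)) 0 = 1 then
      PySem.Int.bxor acc ((List.range ib.length).foldl (fun s j =>
        if r.getD j 0 = 1 then PySem.Int.bxor s (ib.getD j 0) else s) 0)
    else acc) 0]
  refine PySem.List.foldl_congr_mem em _ _ 0 ?_
  intro acc r hr
  have hhead : em.headD [] = (PySem.List.pyGet? em 0).getD [] := by
    cases em with
    | nil => exact absurd rfl hne
    | cons h t => simp
  have hKN : ib.length < ((PySem.List.pyGet? em 0).getD []).length := by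
    have := List.mem_range.mp hk
    omega
  have hlen : ib.length ≤ r.length := by
    have := hrows (by rw [hhead]; exact hKN) r hr
    rw [hhead] at this
    omega
  rw [inner_eq r ib 0 hlen]
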